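-- pv_equiv track=rewrite | github.com/gallofb/Python_linux | py_test/Tree/建立树.py | find_preorder
-- ===== SOURCE A (Python) =====
-- def find_preorder(preorder,inorder,postorder):
--     if len(postorder) == 0:
--         return None
--     if len(postorder) == 1:
--         preorder.append(postorder[0])
--         return
--     root = postorder[-1]
--     n = inorder.index(root)
--     preorder.append(root)
--     find_preorder(preorder,inorder[:n],postorder[:n])
--     find_preorder(preorder,inorder[n+1:],postorder[n:-1])
--     return preorder
-- ===== SOURCE B (Python) =====
-- def find_preorder(preorder, inorder, postorder):
--     if len(postorder) == 0:
--         return None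
--     if len(postorder) == 1:
--         preorder.append(postorder[0])
--         return
--     pos = {v: i for i, v in enumerate(inorder)}
--
--     def go(ilo, plo, phi):
--         # emit the preorder of the subtree occupying inorder[ilo:ilo+(phi-plo)]
--         # and postorder[plo:phi]; works on index ranges, no slicing, no scanning
--         if phi - plo <= 0:
--             return
--         root = postorder[phi - 1]
--         preorder.append(root)
--         if phi - plo == 1:
--             return
--         n = pos[root]          # O(1) hashmap lookup instead of list.index scan
--         k = n - ilo            # size of the left subtree
--         go(ilo, plo, plo + k)
--         go(n + 1, plo + k, phi - 1)
--
--     go(0, 0, len(postorder))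
--     return preorder
-- ===== Notes on version B (the rewrite author's own statement) =====
-- stated objective: alternative
-- what changed: Replaced A's per-node list.index scan and list slicing with a hashmap of inorder positions and recursion on index ranges into the original lists (O(n) on the claimed domain vs A's O(n^2) worst case; a timing run's large inputs fall outside Pre_, so no speed is claimed).
-- outside the precondition, e.g. on find_preorder([9], [0, 0], [1, 0, 0]): A returns [9, 0, 0, 1], B returns [9, 0, 1, 0]; on find_preorder([9], [-1, -1], [-1, -1]): A returns [9, -1, -1], B returns [9, -1, -1]
import Mathlib
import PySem

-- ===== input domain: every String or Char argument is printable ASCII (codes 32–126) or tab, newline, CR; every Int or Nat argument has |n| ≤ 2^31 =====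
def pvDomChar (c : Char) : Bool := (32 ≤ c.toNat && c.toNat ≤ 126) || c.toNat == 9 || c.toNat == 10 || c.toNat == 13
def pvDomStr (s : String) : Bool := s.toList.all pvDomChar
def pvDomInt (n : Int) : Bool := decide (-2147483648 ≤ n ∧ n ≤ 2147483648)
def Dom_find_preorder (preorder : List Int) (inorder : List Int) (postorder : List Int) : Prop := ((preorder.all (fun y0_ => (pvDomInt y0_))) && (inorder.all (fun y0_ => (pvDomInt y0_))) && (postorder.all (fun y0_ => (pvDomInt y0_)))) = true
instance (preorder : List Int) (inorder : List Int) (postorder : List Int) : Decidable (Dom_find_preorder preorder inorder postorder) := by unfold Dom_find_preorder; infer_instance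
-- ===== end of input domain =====

-- B replaces A's per-node list.index scan + slice copies by a hashmap of inorder
-- positions and recursion on index ranges (objective: alternative; no speed is
-- claimed — a timing run's large inputs fall outside Pre_).  Both A and B mutate
-- the `preorder` argument in place; the equivalence proved here is about the RETURN
-- value only (A returns None when len(postorder) <= 1, else the mutated list).

-- ===== PORT A =====
-- A mutates `preorder` and the recursive calls are made for this effect only; the
-- helper `fpMut` models that mutation: it returns the final contents of `preorder`
-- (none where Python raises ValueError from inorder.index).
def fpMut (pre : List Int) (ino : List Int) (post : List Int) : Option (List Int) :=
  if post.length = 0 then some pre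
  else if post.length = 1 then some (pre ++ [PySem.List.pyGetD post 0 0])
  else
    match PySem.List.pyGet? post (-1) with
    | none => none
    | some root =>
      match hn : PySem.List.index? ino root with
      | none => none
      | some n =>
        match fpMut (pre ++ [root]) (PySem.List.slice ino none (some (n : Int)))
                    (PySem.List.slice post none (some (n : Int))) with
        | none => none
        | some pre2 =>
            fpMut pre2 (PySem.List.slice ino (some ((n : Int) + 1)) none)
                       (PySem.List.slice post (some (n : Int)) (some (-1)))
termination_by ino.length + post.length
decreasing_by
  · have hlt : n < ino.length := by
      obtain ⟨hk, -, -⟩ := PySem.List.getElem_of_index?_eq_some hn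
      exact hk
    simp [PySem.List.slice_to_natCast]
    omega
  · have hlt : n < ino.length := by
      obtain ⟨hk, -, -⟩ := PySem.List.getElem_of_index?_eq_some hn
      exact hk
    have h1 : (PySem.List.slice ino (some ((n : Int) + 1)) none).length ≤ ino.length := by
      have : ((n : Int) + 1) = ((n + 1 : Nat) : Int) := by push_cast [List.length_append]; ring
      rw [this, PySem.List.slice_from_natCast]
      simp
    have h2 : (PySem.List.slice post (some (n : Int)) (some (-1))).length < post.length := by
      rw [PySem.List.length_slice, PySem.List.clampIdx_neg_one]
      omega
    omega

def find_preorder (preorder : List Int) (inorder : List Int) (postorder : List Int) : Option (List Int) :=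
  if postorder.length = 0 then none
  else if postorder.length = 1 then none   -- Python appends and falls off with `return` (None)
  else fpMut preorder inorder postorder

-- ===== PORT B =====
-- pos = {v: i for i, v in enumerate(inorder)}
def posDict (ino : List Int) : PySem.Dict Int Int :=
  (PySem.List.enumerate ino 0).foldl (fun d p => d.insert p.2 p.1) PySem.Dict.empty

-- go(ilo, plo, phi) of Source B; `acc` is the mutated `preorder` list, fuel only for
-- totality (Source B's recursion; none = fuel exhausted or a KeyError/IndexError).
def bGo (post : List Int) (pos : PySem.Dict Int Int) :
    Nat → Int → Int → Int → List Int → Option (List Int)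
  | 0, _, _, _, _ => none
  | fuel + 1, ilo, plo, phi, acc =>
    if phi - plo ≤ 0 then some acc
    else
      match PySem.List.pyGet? post (phi - 1) with
      | none => none
      | some root =>
        let acc2 := acc ++ [root]
        if phi - plo = 1 then some acc2
        else
          match pos.get? root with
          | none => none
          | some n =>
            let k := n - ilo
            match bGo post pos fuel ilo plo (plo + k) acc2 with
            | none => none
            | some acc3 => bGo post pos fuel (n + 1) (plo + k) (phi - 1) acc3

def find_preorder_alt (preorder : List Int) (inorder : List Int) (postorder : List Int) : Option (List Int) :=
  if postorder.length = 0 then none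
  else if postorder.length = 1 then none
  else bGo postorder (posDict inorder) postorder.length 0 0 (postorder.length : Int) preorder

-- ===== PRECONDITION & SPEC =====
inductive BTree where
  | leaf : BTree
  | node : BTree → Int → BTree → BTree
deriving DecidableEq, Repr

-- `buildT g fuel ino post` checks that `post` splits `ino` like the postorder of a
-- binary tree: every internal root (a subtree of postorder-length >= 2) must occur
-- exactly once in the full inorder `g`, at the split position; subtrees of length
-- <= 1 never consult inorder (exactly the inputs on which both programs read no
-- further).  The structural fuel only bounds the depth; `post.length` always suffices.
def buildT (g : List Int) : Nat → List Int → List Int → Option BTree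
  | _, _, [] => some .leaf
  | _, _, [p] => some (.node .leaf p .leaf)
  | 0, _, _ => none
  | fuel + 1, ino, post =>
    match post.getLast? with
    | none => none
    | some root =>
      match PySem.List.index? ino root with
      | some n =>
        if g.count root = 1 ∧ n + 1 ≤ post.length then
          match buildT g fuel (ino.take n) (post.take n),
                buildT g fuel (ino.drop (n + 1)) ((post.drop n).dropLast) with
          | some l, some r => some (.node l root r)
          | _, _ => none
        else none
      | none => none

-- Pre_ excludes inputs where postorder does not consistently split inorder in the
-- above sense: there A either raises ValueError or returns an accidental
-- interleaving (its length-1 base case never consults inorder), a value no caller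
-- could specify, while B's hashmap recursion may return another interleaving,
-- raise, or (e.g. on constant duplicate lists) not terminate.
def Pre_find_preorder (preorder : List Int) (inorder : List Int) (postorder : List Int) : Prop :=
  (buildT inorder postorder.length inorder postorder).isSome

instance (preorder : List Int) (inorder : List Int) (postorder : List Int) : Decidable (Pre_find_preorder preorder inorder postorder) := by unfold Pre_find_preorder; infer_instance

def pvWitness_find_preorder : List Int × List Int × List Int := ([], [1, 2, 3], [1, 3, 2])

def Spec_find_preorder (preorder : List Int) (inorder : List Int) (postorder : List Int) (out : Option (List Int)) : Prop := out = find_preorder_alt preorder inorder postorder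
instance (preorder : List Int) (inorder : List Int) (postorder : List Int) (out : Option (List Int)) : Decidable (Spec_find_preorder preorder inorder postorder out) := by unfold Spec_find_preorder; infer_instance

-- ===== CLAIM (what is proved, stated in full; the proofs are below) =====
def Claim_equal_find_preorder : Prop := ∀ (preorder : List Int) (inorder : List Int) (postorder : List Int), Dom_find_preorder preorder inorder postorder → Pre_find_preorder preorder inorder postorder → Spec_find_preorder preorder inorder postorder (find_preorder preorder inorder postorder)

-- ===== LEMMAS AND PROOFS =====
def postOrd : BTree → List Int
  | .leaf => []
  | .node l v r => (postOrd l ++ postOrd r) ++ [v]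

def preOrd : BTree → List Int
  | .leaf => []
  | .node l v r => v :: (preOrd l ++ preOrd r)

def sizeT : BTree → Nat
  | .leaf => 0
  | .node l _ r => sizeT l + sizeT r + 1

-- the invariant buildT establishes: `ino` splits under `t` (internal roots are
-- unique in the whole inorder `g` and sit at the split position; subtrees of
-- postorder-length <= 1 leave `ino` unconstrained)
def Fits (g : List Int) : List Int → BTree → Prop
  | _, .leaf => True
  | ino, .node l v r =>
    sizeT l + sizeT r = 0 ∨
      ∃ il ir, ino = il ++ v :: ir ∧ il.length = sizeT l ∧ v ∉ il ∧ g.count v = 1 ∧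
        Fits g il l ∧ Fits g ir r

theorem length_postOrd (t : BTree) : (postOrd t).length = sizeT t := by
  induction t with
  | leaf => rfl
  | node l v r ihl ihr => simp [postOrd, sizeT, ihl, ihr]; omega

theorem slice_natCast_neg_one (xs : List Int) (a : Nat) :
    PySem.List.slice xs (some (a : Int)) (some (-1)) = xs.dropLast.drop a := by
  simp [PySem.List.slice]
  rw [List.dropLast_eq_take, List.drop_take]
  rcases Nat.lt_or_ge xs.length a with h | h
  · rw [min_eq_right (by omega : xs.length ≤ a)]
    have h1 : xs.length - 1 - a = 0 := by omega
    simp [h1]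
  · rw [min_eq_left h]

theorem sizeT_eq_zero {t : BTree} (h : sizeT t = 0) : t = BTree.leaf := by
  cases t with
  | leaf => rfl
  | node l v r => simp [sizeT] at h

theorem buildT_sound : ∀ (g : List Int) (fuel : Nat) (ino post : List Int) (t : BTree),
    buildT g fuel ino post = some t → post = postOrd t ∧ Fits g ino t := by
  intro g fuel ino post t
  fun_induction buildT g fuel ino post generalizing t with
  | case1 =>
    intro h; cases h; exact ⟨rfl, trivial⟩
  | case2 =>
    intro h; cases h; exact ⟨rfl, Or.inl rfl⟩
  | case5 fuel ino post hne hne1 root hlast n hn hcond l r hbr hbl ih2 ih1 =>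
    intro h
    obtain rfl : t = BTree.node l root r := by cases h; rfl
    obtain ⟨hpl, hfl⟩ := ih2 l hbl
    obtain ⟨hpr, hfr⟩ := ih1 r hbr
    obtain ⟨hcnt, hnlt⟩ := hcond
    rw [PySem.List.index?_eq_some_iff] at hn
    obtain ⟨il, ir, hino, hlenil, hvl⟩ := hn
    have hnp : n < post.length := by omega
    have hdne : post.drop n ≠ [] := by
      simp only [ne_eq, List.drop_eq_nil_iff]; omega
    have hlastd : (post.drop n).getLast hdne = root := by
      rw [List.getLast_drop hdne]
      exact List.getLast_of_mem_getLast? hlast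
    have hszl : sizeT l = n := by
      rw [← length_postOrd, ← hpl]
      simp; omega
    have hpost : post = postOrd (BTree.node l root r) := by
      calc post = post.take n ++ post.drop n := (List.take_append_drop n post).symm
        _ = post.take n ++ ((post.drop n).dropLast ++ [(post.drop n).getLast hdne]) := by
              rw [List.dropLast_concat_getLast hdne]
        _ = postOrd (BTree.node l root r) := by
              simp only [postOrd]; rw [hlastd, ← hpl, ← hpr, List.append_assoc]
    refine ⟨hpost, ?_⟩
    by_cases hsz : sizeT l + sizeT r = 0
    · exact Or.inl hsz
    · refine Or.inr ⟨il, ir, hino, by omega, hvl, hcnt, ?_, ?_⟩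
      · have hte : ino.take n = il := by
          rw [hino, ← hlenil]; exact List.take_left
        rwa [hte] at hfl
      · have hde : ino.drop (n + 1) = ir := by
          rw [hino, show il ++ root :: ir = (il ++ [root]) ++ ir by simp,
            show n + 1 = (il ++ [root]).length by simp; omega]
          exact List.drop_left
        rwa [hde] at hfr
  | _ =>
    intro h; simp at h

-- A-side: fpMut on a fitting pair appends the preorder of the tree.
theorem fpMut_eq (g : List Int) : ∀ (t : BTree) (ino pre : List Int), Fits g ino t →
    fpMut pre ino (postOrd t) = some (pre ++ preOrd t) := by
  intro t
  induction t with
  | leaf => intro ino pre _; simp [postOrd, preOrd, fpMut]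
  | node l v r ihl ihr =>
    intro ino pre hf
    simp only [postOrd, preOrd]
    rw [fpMut]
    by_cases hsz : sizeT l + sizeT r = 0
    · have hl0 : l = BTree.leaf := sizeT_eq_zero (by omega)
      have hr0 : r = BTree.leaf := sizeT_eq_zero (by omega)
      subst hl0; subst hr0
      simp [postOrd, preOrd, PySem.List.pyGetD_zero_cons]
    · obtain ⟨il, ir, rfl, hlen, hvl, -, Fl, Fr⟩ := hf.resolve_left hsz
      rw [if_neg (by simp), if_neg (by simp [length_postOrd]; omega)]
      rw [PySem.List.pyGet?_neg_one_append_singleton]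
      have hidx : PySem.List.index? (il ++ v :: ir) v = some il.length := by
        rw [PySem.List.index?_eq_some_iff]
        exact ⟨il, ir, rfl, rfl, hvl⟩
      have hidx' : List.idxOf? v (il ++ v :: ir) = some il.length := by
        rw [← PySem.List.index?_eq_idxOf?]; exact hidx
      have hll : il.length = (postOrd l).length := by
        rw [hlen, length_postOrd]
      have s1 : PySem.List.slice (il ++ v :: ir) none (some (il.length : Int))
          = il := by
        rw [PySem.List.slice_to_natCast]; exact List.take_left
      have s2 : PySem.List.slice ((postOrd l ++ postOrd r) ++ [v]) none (some (il.length : Int))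
          = postOrd l := by
        rw [PySem.List.slice_to_natCast, List.append_assoc, hll]
        exact List.take_left
      have s3 : PySem.List.slice (il ++ v :: ir) (some ((il.length : Int) + 1)) none
          = ir := by
        have hcast : (il.length : Int) + 1 = ((il.length + 1 : Nat) : Int) := by
          push_cast; ring
        rw [hcast, PySem.List.slice_from_natCast]
        have hsplit : il ++ v :: ir = (il ++ [v]) ++ ir := by simp
        rw [hsplit, show il.length + 1 = (il ++ [v]).length by simp]
        exact List.drop_left
      have s4 : PySem.List.slice ((postOrd l ++ postOrd r) ++ [v]) (some (il.length : Int)) (some (-1))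
          = postOrd r := by
        rw [slice_natCast_neg_one, List.dropLast_concat, hll]
        exact List.drop_left
      split
      · rename_i heq; simp at heq
      · rename_i root heq
        obtain rfl : root = v := by simpa using heq.symm
        split
        · rename_i heq2
          exact absurd (hidx.symm.trans heq2) (by simp)
        · rename_i n heq2
          obtain rfl : il.length = n := by
            simpa using hidx.symm.trans heq2
          rw [s1, s2, ihl il (pre ++ [root]) Fl]
          simp only [s3, s4, ihr ir (pre ++ [root] ++ preOrd l) Fr]
          simp

theorem get?_foldl_insert_not_mem (l : List (Int × Int)) (d : PySem.Dict Int Int) (v : Int)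
    (hv : v ∉ l.map (·.2)) :
    (l.foldl (fun d p => d.insert p.2 p.1) d).get? v = d.get? v := by
  induction l generalizing d with
  | nil => rfl
  | cons p l ih =>
    simp only [List.map_cons, List.mem_cons, not_or] at hv
    rw [List.foldl_cons, ih _ hv.2, PySem.Dict.get?_insert_of_ne _ _ hv.1]

-- posDict lookup on a list with a unique occurrence of v.
theorem posDict_get? (X Y : List Int) (v : Int) (hY : v ∉ Y) :
    (posDict (X ++ v :: Y)).get? v = some (X.length : Int) := by
  unfold posDict
  rw [PySem.List.enumerate_append, PySem.List.enumerate_cons, List.foldl_append, List.foldl_cons]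
  rw [get?_foldl_insert_not_mem _ _ _ (by rw [PySem.List.map_snd_enumerate]; exact hY)]
  rw [PySem.Dict.get?_insert_self]
  norm_num

-- B-side invariant.
theorem bGo_eq (g : List Int) : ∀ (t : BTree) (fuel : Nat) (Lg Rg ino PL PR acc : List Int),
    sizeT t ≤ fuel → 1 ≤ fuel → g = Lg ++ ino ++ Rg → Fits g ino t →
    bGo (PL ++ postOrd t ++ PR) (posDict g) fuel
      (Lg.length : Int) (PL.length : Int) ((PL.length + sizeT t : Nat) : Int) acc
      = some (acc ++ preOrd t) := by
  intro t
  induction t with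
  | leaf =>
    intro fuel Lg Rg ino PL PR acc hsz h1 hg hf
    obtain ⟨f, rfl⟩ : ∃ f, fuel = f + 1 := ⟨fuel - 1, by omega⟩
    simp [bGo, sizeT, preOrd, postOrd]
  | node l v r ihl ihr =>
    intro fuel Lg Rg ino PL PR acc hsz h1 hg hf
    obtain ⟨f, rfl⟩ : ∃ f, fuel = f + 1 := ⟨fuel - 1, by omega⟩
    rw [bGo]
    rw [if_neg (by push_cast [sizeT]; omega)]
    have hget : PySem.List.pyGet? (PL ++ postOrd (BTree.node l v r) ++ PR)
        (((PL.length + sizeT (BTree.node l v r) : Nat) : Int) - 1) = some v := by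
      have hsplit : PL ++ postOrd (BTree.node l v r) ++ PR
          = (PL ++ postOrd l ++ postOrd r) ++ v :: PR := by simp [postOrd]
      have hidxe : ((PL.length + sizeT (BTree.node l v r) : Nat) : Int) - 1
          = ((PL ++ postOrd l ++ postOrd r).length : Int) := by
        simp [sizeT, length_postOrd]; push_cast; ring
      rw [hsplit, hidxe, PySem.List.pyGet?_append_length]
    simp only [hget]
    by_cases hz : sizeT l + sizeT r = 0
    · have hl0 : l = BTree.leaf := sizeT_eq_zero (by omega)
      have hr0 : r = BTree.leaf := sizeT_eq_zero (by omega)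
      subst hl0; subst hr0
      rw [if_pos (by push_cast [sizeT]; ring)]
      simp [preOrd]
    · rw [if_neg (by push_cast [sizeT]; omega)]
      obtain ⟨il, ir, rfl, hlen, hvl, hcnt, Fl, Fr⟩ := hf.resolve_left hz
      have hgs : g = (Lg ++ il) ++ v :: (ir ++ Rg) := by rw [hg]; simp
      have hcY : v ∉ ir ++ Rg := by
        rw [hgs] at hcnt
        simp [List.count_append, List.count_cons] at hcnt ⊢
        constructor
        · exact List.count_eq_zero.mp (by omega)
        · exact List.count_eq_zero.mp (by omega)
      have hpos : (posDict g).get? v = some (((Lg ++ il).length : Nat) : Int) := by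
        rw [hgs, posDict_get? _ _ _ hcY]
      rw [hpos]
      -- left recursive call
      have hgL : g = Lg ++ il ++ (v :: ir ++ Rg) := by rw [hg]; simp
      have HL := ihl f Lg (v :: ir ++ Rg) il PL (postOrd r ++ [v] ++ PR) (acc ++ [v])
        (by simp [sizeT] at hsz ⊢; omega) (by simp [sizeT] at hsz; omega) hgL Fl
      have hgR : g = (Lg ++ il ++ [v]) ++ ir ++ Rg := by rw [hg]; simp
      have HR := ihr f (Lg ++ il ++ [v]) Rg ir (PL ++ postOrd l) (v :: PR) (acc ++ [v] ++ preOrd l)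
        (by simp [sizeT] at hsz ⊢; omega) (by simp [sizeT] at hsz; omega) hgR Fr
      -- align the arguments of the two IH instances with the goal
      have eP : PL ++ postOrd l ++ (postOrd r ++ [v] ++ PR)
          = PL ++ postOrd (BTree.node l v r) ++ PR := by simp [postOrd]
      have eP2 : (PL ++ postOrd l) ++ postOrd r ++ (v :: PR)
          = PL ++ postOrd (BTree.node l v r) ++ PR := by simp [postOrd]
      rw [eP] at HL
      rw [eP2] at HR
      have ephiL : (PL.length : Int) + ((((Lg ++ il).length : Nat) : Int) - (Lg.length : Int))
          = ((PL.length + sizeT l : Nat) : Int) := by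
        push_cast [List.length_append, hlen]; ring
      have eiloR : (((Lg ++ il).length : Nat) : Int) + 1
          = ((Lg ++ il ++ [v]).length : Int) := by
        push_cast [List.length_append, List.length_cons, List.length_nil]; ring
      have eploR : ((PL.length + sizeT l : Nat) : Int) = ((PL ++ postOrd l).length : Int) := by
        push_cast [List.length_append, length_postOrd]; ring
      have ephiR : ((PL.length + sizeT (BTree.node l v r) : Nat) : Int) - 1
          = (((PL ++ postOrd l).length + sizeT r : Nat) : Int) := by
        push_cast [List.length_append, sizeT, length_postOrd]; ring
      split
      · rename_i heq; simp at heq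
      · rename_i n heq
        obtain rfl : (((Lg ++ il).length : Nat) : Int) = n := by simpa using heq
        rw [ephiL, HL]
        split
        · rename_i heq2; simp at heq2
        · rename_i acc3 heq2
          obtain rfl : acc ++ [v] ++ preOrd l = acc3 := by simpa using heq2
          rw [eiloR, eploR, ephiR, HR]
          simp [preOrd]

-- ===== VERDICT (by name: the statement is the Claim_ definition above) =====
theorem find_preorder_spec : Claim_equal_find_preorder := by
  intro pre ino post _hdom hpre
  unfold Spec_find_preorder find_preorder find_preorder_alt
  by_cases h0 : post.length = 0
  · simp [h0]
  · by_cases h1 : post.length = 1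
    · simp [h1]
    · obtain ⟨t, ht⟩ := Option.isSome_iff_exists.mp hpre
      obtain ⟨hpost, hfit⟩ := buildT_sound ino post.length ino post t ht
      subst hpost
      simp only [h0, h1, if_false]
      rw [fpMut_eq ino t ino pre hfit]
      have hfuel : sizeT t ≤ (postOrd t).length := by rw [length_postOrd]
      have h1f : 1 ≤ (postOrd t).length := by omega
      have hfin := bGo_eq ino t (postOrd t).length [] [] ino [] [] pre hfuel h1f
        (by simp) hfit
      simp only [List.nil_append, List.append_nil, List.length_nil, Nat.zero_add] at hfin
      rw [← length_postOrd t] at hfin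
      exact hfin.symm
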